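-- pv_equiv track=rewrite | github.com/kimth007kim/python_algorithm | this_is_coding_test_2회차/Part13 DFSBFS_2/13-18 괄호 변환.py | check
-- ===== SOURCE A (Python) =====
-- def check(p):
--     cnt = 0
--     for i in range(len(p)):
--         if p[i] == '(':
--             cnt -= 1
--         else:
--             cnt += 1
--         if cnt == 0:
--             return i
--             break
--     return len(p)
-- ===== SOURCE B (Python) =====
-- def check(p):
--     # two-phase: build the running-balance table, then search it for the first 0
--     bal = []
--     c = 0
--     for ch in p:
--         c += -1 if ch == '(' else 1
--         bal.append(c)
--     return bal.index(0) if 0 in bal else len(p)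
-- ===== Notes on version B (the rewrite author's own statement) =====
-- stated objective: alternative
-- what changed: A's single fused loop with an early return is replaced by a two-phase structure: first build the full cumulative-balance list, then search it for the first index holding 0 (falling back to len(p)).
import Mathlib
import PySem

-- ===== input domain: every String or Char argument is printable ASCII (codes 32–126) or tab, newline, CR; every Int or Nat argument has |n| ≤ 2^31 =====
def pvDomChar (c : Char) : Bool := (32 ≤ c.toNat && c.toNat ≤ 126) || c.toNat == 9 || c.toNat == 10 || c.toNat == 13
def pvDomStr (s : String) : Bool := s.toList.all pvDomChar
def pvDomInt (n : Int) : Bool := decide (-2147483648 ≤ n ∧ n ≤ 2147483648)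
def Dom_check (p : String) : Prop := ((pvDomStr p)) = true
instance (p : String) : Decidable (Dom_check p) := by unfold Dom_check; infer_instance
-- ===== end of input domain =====

-- B replaces A's fused loop-with-early-return by a two-phase build-balance-table-then-search structure (alternative decomposition, same cost).


-- ===== PORT A =====
-- A's loop over range(len(p)) with the running counter and early return, as structural recursion over the chars.
def checkLoop (cs : List Char) (cnt : Int) (i : Nat) (n : Nat) : Int :=
  match cs with
  | [] => (n : Int)
  | c :: rest =>
    let cnt' := if c = '(' then cnt - 1 else cnt + 1
    if cnt' = 0 then (i : Int) else checkLoop rest cnt' (i + 1) n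

def check (p : String) : Int := checkLoop p.toList 0 0 p.toList.length

-- ===== PORT B =====
-- phase 1: the running-balance list
def balances (cs : List Char) (acc : Int) : List Int :=
  match cs with
  | [] => []
  | c :: rest =>
    let a := acc + (if c = '(' then -1 else 1)
    a :: balances rest a

-- phase 2: bal.index(0) if 0 in bal else len(p)
def check_alt (p : String) : Int :=
  let bal := balances p.toList 0
  match PySem.List.index? bal 0 with
  | some j => (j : Int)
  | none => (p.toList.length : Int)

-- ===== PRECONDITION & SPEC =====
def Spec_check (p : String) (out : Int) : Prop := out = check_alt p
instance (p : String) (out : Int) : Decidable (Spec_check p out) := by unfold Spec_check; infer_instance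

-- ===== CLAIM (what is proved, stated in full; the proofs are below) =====
def Claim_equal_check : Prop := ∀ (p : String), Dom_check p → Spec_check p (check p)

-- ===== LEMMAS AND PROOFS =====
theorem checkLoop_eq (cs : List Char) (cnt : Int) (i n : Nat) :
    checkLoop cs cnt i n =
      match PySem.List.index? (balances cs cnt) 0 with
      | some j => ((i + j : Nat) : Int)
      | none => (n : Int) := by
  induction cs generalizing cnt i with
  | nil => simp [checkLoop, balances, PySem.List.index?]
  | cons c rest ih =>
    have harith : (if c = '(' then cnt - 1 else cnt + 1) = cnt + (if c = '(' then -1 else 1) := by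
      split <;> ring
    simp only [checkLoop, balances, harith]
    by_cases h : cnt + (if c = '(' then -1 else 1) = 0
    · rw [if_pos h, h, PySem.List.index?_cons_self]
      simp
    · rw [if_neg h, PySem.List.index?_cons_of_ne _ h, ih]
      cases hidx : PySem.List.index? (balances rest (cnt + (if c = '(' then -1 else 1))) 0 with
      | none => simp
      | some j =>
        simp only [Option.map_some]
        push_cast; ring

-- ===== VERDICT (by name: the statement is the Claim_ definition above) =====
theorem check_spec : Claim_equal_check := by
  intro p _
  unfold Spec_check check check_alt
  rw [checkLoop_eq]
  simp only []
  cases h : PySem.List.index? (balances p.toList 0) 0 with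
  | none => simp
  | some j => simp
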